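-- pv_equiv track=rewrite | github.com/Catornado-Wind/Scrabble_Training_Website | queries.py | list_query
-- ===== SOURCE A (Python) =====
-- def list_query(length=None, contain_letters=tuple(), contains_all=True, without_letters=tuple()):
--     where_inserted = False
--     query = "SELECT word, anagram\nFROM Word"
--
--     if length is not None:
--         query += f"\nWHERE length = {length}"
--         where_inserted = True
--
--     if len(contain_letters) > 0:
--         if where_inserted:
--             if contains_all:
--                 query += f"\nAND (num_{contain_letters[0].upper()} > 0"
--                 for letter in contain_letters[1:]:
--                     query += f"\nAND num_{letter.upper()} > 0"
--
--                 query += ")"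
--
--             else:
--                 query += f"\nAND (num_{contain_letters[0].upper()} > 0"
--                 for letter in contain_letters[1:]:
--                     query += f"\nOR num_{letter.upper()} > 0"
--
--                 query += ")"
--
--         else:
--             if contains_all:
--                 query += f"\nWHERE (num_{contain_letters[0].upper()} > 0"
--                 for letter in contain_letters[1:]:
--                     query += f"\nAND num_{letter.upper()} > 0"
--
--                 query += ")"
--
--             else:
--                 query += f"\nWHERE (num_{contain_letters[0].upper()} > 0"
--                 for letter in contain_letters[1:]:
--                     query += f"\nOR num_{letter.upper()} > 0"
--
--                 query += ")"
--
--             where_inserted = True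
--
--     if len(without_letters) > 0:
--         if where_inserted:
--             for letter in without_letters:
--                 query += f"\nAND num_{letter.upper()} = 0"
--
--         else:
--             query += f"\nWHERE num_{without_letters[0].upper()} = 0"
--             for letter in without_letters[1:]:
--                 query += f"\nAND num_{letter.upper()} = 0"
--
--             where_inserted = True
--
--     query += ";"
--
--     return query
-- ===== SOURCE B (Python) =====
-- def list_query(length=None, contain_letters=tuple(), contains_all=True, without_letters=tuple()):
--     fragments = []
--     if length is not None:
--         fragments.append(f"length = {length}")
--     if contain_letters:
--         joiner = "\nAND " if contains_all else "\nOR "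
--         fragments.append("(" + joiner.join(f"num_{l.upper()} > 0" for l in contain_letters) + ")")
--     for l in without_letters:
--         fragments.append(f"num_{l.upper()} = 0")
--     query = "SELECT word, anagram\nFROM Word"
--     for i, frag in enumerate(fragments):
--         query += ("\nWHERE " if i == 0 else "\nAND ") + frag
--     return query + ";"
-- ===== Notes on version B (the rewrite author's own statement) =====
-- stated objective: simpler
-- what changed: B builds a flat list of top-level WHERE-clause fragments (length, one parenthesised joined contain-group, one 'num_X = 0' per excluded letter) and assembles the query by prefixing the first fragment with '\nWHERE ' and the rest with '\nAND ', eliminating A's where_inserted flag and its four duplicated branch bodies.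
import Mathlib
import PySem

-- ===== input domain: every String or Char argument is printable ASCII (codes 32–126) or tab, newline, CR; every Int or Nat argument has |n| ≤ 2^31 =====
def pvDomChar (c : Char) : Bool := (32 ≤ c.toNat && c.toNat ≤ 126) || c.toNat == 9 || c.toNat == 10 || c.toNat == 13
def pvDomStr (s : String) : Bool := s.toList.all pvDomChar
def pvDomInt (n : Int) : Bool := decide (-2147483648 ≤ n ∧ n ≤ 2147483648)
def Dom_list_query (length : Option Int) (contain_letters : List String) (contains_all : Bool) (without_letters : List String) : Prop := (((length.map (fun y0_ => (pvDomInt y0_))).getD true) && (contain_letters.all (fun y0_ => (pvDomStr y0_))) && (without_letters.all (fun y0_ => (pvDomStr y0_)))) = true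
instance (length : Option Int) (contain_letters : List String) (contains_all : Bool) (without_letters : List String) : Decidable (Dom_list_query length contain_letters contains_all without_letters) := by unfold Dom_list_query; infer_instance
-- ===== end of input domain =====

-- B replaces A's where_inserted flag-threading and duplicated branches by building a list of
-- top-level WHERE fragments and joining them ("\nWHERE " before the first, "\nAND " before the rest): simpler decomposition, same cost.


-- ===== PORT A =====
-- literal transliteration of A: one growing query string plus the where_inserted flag
def list_query (length : Option Int) (contain_letters : List String) (contains_all : Bool) (without_letters : List String) : String :=
  let st0 : String × Bool := ("SELECT word, anagram\nFROM Word", false)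
  let st1 : String × Bool :=
    match length with
    | some n => (st0.1 ++ "\nWHERE length = " ++ PySem.Int.toStr n, true)
    | none => st0
  let st2 : String × Bool :=
    match contain_letters with
    | [] => st1
    | c0 :: rest =>
      if st1.2 then
        if contains_all then
          (rest.foldl (fun q letter => q ++ "\nAND num_" ++ PySem.Str.upper letter ++ " > 0")
             (st1.1 ++ "\nAND (num_" ++ PySem.Str.upper c0 ++ " > 0") ++ ")", st1.2)
        else
          (rest.foldl (fun q letter => q ++ "\nOR num_" ++ PySem.Str.upper letter ++ " > 0")
             (st1.1 ++ "\nAND (num_" ++ PySem.Str.upper c0 ++ " > 0") ++ ")", st1.2)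
      else
        if contains_all then
          (rest.foldl (fun q letter => q ++ "\nAND num_" ++ PySem.Str.upper letter ++ " > 0")
             (st1.1 ++ "\nWHERE (num_" ++ PySem.Str.upper c0 ++ " > 0") ++ ")", true)
        else
          (rest.foldl (fun q letter => q ++ "\nOR num_" ++ PySem.Str.upper letter ++ " > 0")
             (st1.1 ++ "\nWHERE (num_" ++ PySem.Str.upper c0 ++ " > 0") ++ ")", true)
  let st3 : String × Bool :=
    match without_letters with
    | [] => st2
    | w0 :: rest =>
      if st2.2 then
        (without_letters.foldl (fun q letter => q ++ "\nAND num_" ++ PySem.Str.upper letter ++ " = 0") st2.1, st2.2)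
      else
        (rest.foldl (fun q letter => q ++ "\nAND num_" ++ PySem.Str.upper letter ++ " = 0")
           (st2.1 ++ "\nWHERE num_" ++ PySem.Str.upper w0 ++ " = 0"), true)
  st3.1 ++ ";"

-- ===== PORT B =====
-- transliteration of Python's str.join
def pyJoin (sep : String) : List String → String
  | [] => ""
  | [x] => x
  | x :: y :: xs => x ++ sep ++ pyJoin sep (y :: xs)

def list_query_alt (length : Option Int) (contain_letters : List String) (contains_all : Bool) (without_letters : List String) : String :=
  let fragments : List String :=
    (match length with
     | some n => ["length = " ++ PySem.Int.toStr n]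
     | none => [])
    ++ (match contain_letters with
        | [] => []
        | _ :: _ =>
          let joiner := if contains_all then "\nAND " else "\nOR "
          ["(" ++ pyJoin joiner (contain_letters.map (fun l => "num_" ++ PySem.Str.upper l ++ " > 0")) ++ ")"])
    ++ without_letters.map (fun l => "num_" ++ PySem.Str.upper l ++ " = 0")
  -- fold state: (query so far, "is this the first fragment?")
  let st := fragments.foldl
    (fun (acc : String × Bool) frag =>
      (acc.1 ++ (if acc.2 then "\nWHERE " else "\nAND ") ++ frag, false))
    ("SELECT word, anagram\nFROM Word", true)
  st.1 ++ ";"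

-- ===== PRECONDITION & SPEC =====
def Spec_list_query (length : Option Int) (contain_letters : List String) (contains_all : Bool) (without_letters : List String) (out : String) : Prop := out = list_query_alt length contain_letters contains_all without_letters
instance (length : Option Int) (contain_letters : List String) (contains_all : Bool) (without_letters : List String) (out : String) : Decidable (Spec_list_query length contain_letters contains_all without_letters out) := by unfold Spec_list_query; infer_instance

-- ===== CLAIM (what is proved, stated in full; the proofs are below) =====
def Claim_equal_list_query : Prop := ∀ (length : Option Int) (contain_letters : List String) (contains_all : Bool) (without_letters : List String), Dom_list_query length contain_letters contains_all without_letters → Spec_list_query length contain_letters contains_all without_letters (list_query length contain_letters contains_all without_letters)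

-- ===== LEMMAS AND PROOFS =====
theorem foldl_str : ∀ (l : List String) (a : String),
    l.foldl (fun r s => r ++ s) a = a ++ String.join l := by
  intro l
  induction l with
  | nil => intro a; simp [String.join]
  | cons h t ih =>
    intro a
    show t.foldl (fun r s => r ++ s) (a ++ h) = a ++ String.join (h :: t)
    have hj : String.join (h :: t) = h ++ String.join t := by
      show t.foldl (fun r s => r ++ s) ("" ++ h) = h ++ String.join t
      rw [show ("" : String) ++ h = h from by simp, ih]
    rw [ih, hj, String.append_assoc]

theorem join_cons (h : String) (t : List String) :
    String.join (h :: t) = h ++ String.join t := by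
  show t.foldl (fun r s => r ++ s) ("" ++ h) = h ++ String.join t
  rw [show ("" : String) ++ h = h from by simp, foldl_str]

theorem join_foldl (f : String → String) : ∀ (t : List String) (q : String),
    t.foldl (fun q l => q ++ f l) q = q ++ String.join (t.map f) := by
  intro t
  induction t with
  | nil => intro q; simp [String.join]
  | cons h t ih =>
    intro q
    simp only [List.map_cons, List.foldl_cons, ih, join_cons, String.append_assoc]

theorem pyJoin_cons (sep x : String) : ∀ (xs : List String),
    pyJoin sep (x :: xs) = x ++ String.join (xs.map (fun y => sep ++ y)) := by
  intro xs
  induction xs generalizing x with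
  | nil => simp [pyJoin, String.join]
  | cons y ys ih => simp only [pyJoin, ih, List.map_cons, join_cons, String.append_assoc]

-- B's fragment fold, once past the first fragment
theorem foldB_false : ∀ (fs : List String) (q : String),
    (fs.foldl (fun (acc : String × Bool) frag =>
        (acc.1 ++ ((if acc.2 then "\nWHERE " else "\nAND ") ++ frag), false)) (q, false)).1
      = q ++ String.join (fs.map (fun f => "\nAND " ++ f)) := by
  intro fs
  induction fs with
  | nil => intro q; simp [String.join]
  | cons h t ih =>
    intro q
    simp only [List.foldl_cons, Bool.false_eq_true, if_false, ih, List.map_cons, join_cons,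
      String.append_assoc]

-- ===== VERDICT (by name: the statement is the Claim_ definition above) =====
theorem list_query_spec : Claim_equal_list_query := by
  intro length contain_letters contains_all without_letters _
  unfold Spec_list_query list_query list_query_alt
  cases length <;> cases contain_letters <;> cases contains_all <;> cases without_letters <;>
    simp only [String.append_assoc, Function.comp_def, List.map_map, List.map_cons, List.map_nil,
      List.cons_append, List.nil_append, List.append_nil, join_foldl,
      pyJoin_cons, foldB_false, List.foldl_cons, List.foldl_nil, Bool.false_eq_true,
      if_false, if_true] <;>
    simp [← String.append_assoc]
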